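-- pv_equiv track=rewrite | github.com/Mate18atorrante/AEDGUIA2025 | 1. Elementales/1.2 Subacciones/funciones y procedimientos/en python/1.2.4.py | calculo_clave
-- ===== SOURCE A (Python) =====
-- def calculo_clave(n):
--     if n < 0:
--         return -1
--     else:
--         suma = 0
--
--         while n > 0:
--             suma += n % 10
--             n //= 10
--         return suma % 7
-- ===== SOURCE B (Python) =====
-- def calculo_clave(n):
--     if n < 0:
--         return -1
--     return sum(int(c) for c in str(n)) % 7
-- ===== Notes on version B (the rewrite author's own statement) =====
-- stated objective: idiomatic
-- what changed: Replaces the mod-10/floor-div-10 extraction loop with a character-by-character sum over the decimal string representation str(n) (most-significant-first, no arithmetic loop state).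
import Mathlib
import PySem

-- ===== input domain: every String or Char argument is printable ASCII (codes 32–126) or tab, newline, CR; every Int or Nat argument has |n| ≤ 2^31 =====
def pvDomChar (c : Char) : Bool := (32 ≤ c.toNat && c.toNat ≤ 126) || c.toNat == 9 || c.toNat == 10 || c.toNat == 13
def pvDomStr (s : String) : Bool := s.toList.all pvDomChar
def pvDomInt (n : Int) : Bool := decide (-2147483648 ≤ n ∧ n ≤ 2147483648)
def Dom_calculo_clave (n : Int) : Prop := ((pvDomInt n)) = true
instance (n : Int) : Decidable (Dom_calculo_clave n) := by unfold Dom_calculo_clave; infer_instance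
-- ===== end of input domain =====

-- B replaces A's mod-10/floor-div-10 extraction loop by summing the digit characters of str(n); same cost, more idiomatic.

-- ===== PORT A =====
-- the while loop: state (n, suma), 'while n > 0: suma += n % 10; n //= 10'
-- (fuel n.toNat + 1 only guards totality: the loop runs at most n.toNat iterations)
def pvLoopA : Nat → Int → Int → Int
  | 0, _, suma => suma
  | fuel + 1, n, suma =>
      if n > 0 then pvLoopA fuel (PySem.Int.floordiv n 10) (suma + PySem.Int.mod n 10) else suma

def calculo_clave (n : Int) : Int :=
  if n < 0 then -1 else PySem.Int.mod (pvLoopA (n.toNat + 1) n 0) 7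

-- ===== PORT B =====
-- int(c); exact here because every character of str(n) for n ≥ 0 is a decimal digit (int(c) never raises)
def pvIntChar (c : Char) : Int := (PySem.Int.ofChars? [c]).getD 0

def calculo_clave_alt (n : Int) : Int :=
  if n < 0 then -1
  else PySem.Int.mod ((PySem.Int.toChars n).foldl (fun acc c => acc + pvIntChar c) 0) 7

-- ===== PRECONDITION & SPEC =====
def Spec_calculo_clave (n : Int) (out : Int) : Prop := out = calculo_clave_alt n
instance (n : Int) (out : Int) : Decidable (Spec_calculo_clave n out) := by unfold Spec_calculo_clave; infer_instance

-- ===== CLAIM (what is proved, stated in full; the proofs are below) =====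
def Claim_equal_calculo_clave : Prop := ∀ (n : Int), Dom_calculo_clave n → Spec_calculo_clave n (calculo_clave n)

-- ===== LEMMAS AND PROOFS =====

-- digit sum of a natural number, little-endian extraction (the value A's loop accumulates)
def pvDsum (m : Nat) : Int :=
  if m = 0 then 0 else (m % 10 : Nat) + pvDsum (m / 10)

lemma pvDsum_eq (m : Nat) : pvDsum m = ((m % 10 : Nat) : Int) + pvDsum (m / 10) := by
  by_cases h : m = 0
  · subst h; simp [pvDsum]
  · rw [pvDsum]; simp [h]

lemma pvLoopA_eq (fuel : Nat) : ∀ (n suma : Int), n.toNat < fuel →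
    pvLoopA fuel n suma = suma + pvDsum n.toNat := by
  induction fuel with
  | zero => intro n suma h; omega
  | succ f ih =>
    intro n suma h
    by_cases hn : n > 0
    · rw [pvLoopA]
      simp only [hn, if_pos]
      have hd : (PySem.Int.floordiv n 10).toNat = n.toNat / 10 := by
        simp only [PySem.Int.floordiv]
        have := Int.fdiv_eq_ediv (a := n) (b := 10)
        omega
      have hm : PySem.Int.mod n 10 = ((n.toNat % 10 : Nat) : Int) := by
        simp only [PySem.Int.mod]
        have := Int.fmod_eq_emod (a := n) (b := 10)
        omega
      have hlt : (PySem.Int.floordiv n 10).toNat < f := by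
        rw [hd]
        have h2 : n.toNat / 10 < n.toNat := Nat.div_lt_self (by omega) (by norm_num)
        omega
      rw [ih (PySem.Int.floordiv n 10) _ hlt, hd, hm, pvDsum_eq n.toNat]
      ring
    · rw [pvLoopA]
      simp only [hn, if_neg, not_false_iff]
      have : n.toNat = 0 := by omega
      simp [this, pvDsum]

lemma pvFoldl_shift (l : List Char) (a : Int) :
    l.foldl (fun acc c => acc + pvIntChar c) a = a + l.foldl (fun acc c => acc + pvIntChar c) 0 := by
  induction l generalizing a with
  | nil => simp
  | cons c t ih => simp only [List.foldl_cons]; rw [ih, ih (0 + pvIntChar c)]; ring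

lemma pvIntChar_digitChar (d : Nat) (h : d < 10) : pvIntChar (Nat.digitChar d) = (d : Int) := by
  interval_cases d <;> decide

lemma pvCore (fuel : Nat) : ∀ (n : Nat) (ds : List Char), n < fuel →
    (Nat.toDigitsCore 10 fuel n ds).foldl (fun acc c => acc + pvIntChar c) 0
      = pvDsum n + ds.foldl (fun acc c => acc + pvIntChar c) 0 := by
  induction fuel with
  | zero => intro n ds h; omega
  | succ f ih =>
    intro n ds h
    rw [Nat.toDigitsCore]
    by_cases h0 : n / 10 = 0
    · simp only [h0, if_pos]
      rw [List.foldl_cons, pvFoldl_shift, pvIntChar_digitChar (n % 10) (by omega),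
        pvDsum_eq n, h0]
      simp [pvDsum]
    · simp only [h0, if_neg, not_false_iff]
      have hlt : n / 10 < f := by
        have h1 : 1 ≤ n / 10 := by omega
        have h2 : n / 10 < n := Nat.div_lt_self (by omega) (by norm_num)
        omega
      rw [ih (n / 10) _ hlt, List.foldl_cons, pvFoldl_shift,
        pvIntChar_digitChar (n % 10) (by omega), pvDsum_eq n]
      ring

lemma pvSum_toChars (n : Int) (h : ¬ n < 0) :
    (PySem.Int.toChars n).foldl (fun acc c => acc + pvIntChar c) 0 = pvDsum n.toNat := by
  simp only [PySem.Int.toChars, if_neg h, Nat.toDigits]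
  rw [pvCore (n.toNat + 1) n.toNat [] (by omega)]
  simp

-- ===== VERDICT (by name: the statement is the Claim_ definition above) =====
theorem calculo_clave_spec : Claim_equal_calculo_clave := by
  intro n _
  unfold Spec_calculo_clave calculo_clave calculo_clave_alt
  by_cases h : n < 0
  · simp [h]
  · simp only [h, if_neg, not_false_iff]
    rw [pvSum_toChars n h, pvLoopA_eq (n.toNat + 1) n 0 (by omega), zero_add]
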